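-- pv_equiv track=rewrite | github.com/joshanashakya/dissertation | workspace/dataset/java-python/GeeksForGeeks/2734/A/2.py | countTotalDistinct
-- ===== SOURCE A (Python) =====
-- def countTotalDistinct(string) :
--
--     cnt = 0;
--
--     # To store all the sub-strings
--     items = set();
--
--     for i in range(len(string)) :
--
--         # To store the current sub-string
--         temp = "";
--
--         # To store the characters of the
--         # current sub-string
--         ans = set();
--         for j in range(i, len(string)) :
--             temp = temp + string[j];
--             ans.add(string[j]);
--
--             # If current sub-string hasn't
--             # been stored before
--             if temp not in items :
--
--                 # Insert it into the set
--                 items.add(temp);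
--
--                 # Update the count of
--                 # distinct characters
--                 cnt += len(ans);
--
--     return cnt;
-- ===== SOURCE B (Python) =====
-- def countTotalDistinct(string):
--     # Group substrings by END position and extend LEFTWARD, maintaining the
--     # distinct-character set of the current suffix-of-prefix incrementally;
--     # substrings are taken by slicing instead of repeated concatenation.
--     total = 0
--     seen = set()
--     n = len(string)
--     for j in range(1, n + 1):
--         chars = set()
--         for i in range(j - 1, -1, -1):
--             chars.add(string[i])
--             sub = string[i:j]
--             if sub not in seen:
--                 seen.add(sub)
--                 total += len(chars)
--     return total
-- ===== Notes on version B (the rewrite author's own statement) =====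
-- stated objective: alternative
-- what changed: B enumerates substrings grouped by end position and extends them leftward with range(j-1,-1,-1), taking each substring by slicing and growing the distinct-char set from the right end, instead of A's start-position grouping with rightward string concatenation; the proof shows the enumeration order of the distinct substrings does not change the sum.
import Mathlib
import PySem

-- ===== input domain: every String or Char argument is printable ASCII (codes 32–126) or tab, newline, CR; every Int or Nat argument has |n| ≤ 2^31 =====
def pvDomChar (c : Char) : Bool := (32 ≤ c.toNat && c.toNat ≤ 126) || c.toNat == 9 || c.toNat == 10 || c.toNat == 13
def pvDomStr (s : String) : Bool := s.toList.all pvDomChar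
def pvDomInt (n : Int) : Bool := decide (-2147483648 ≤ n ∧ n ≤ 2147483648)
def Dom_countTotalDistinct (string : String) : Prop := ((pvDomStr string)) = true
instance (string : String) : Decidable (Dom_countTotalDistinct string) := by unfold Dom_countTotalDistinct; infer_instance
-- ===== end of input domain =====

-- B re-implements A with a different traversal: substrings grouped by END position and
-- extended leftward (range(j-1,-1,-1)), taken by slicing; objective: alternative (the
-- enumeration order of the distinct substrings is proved not to matter).

-- ===== PORT A =====
-- A: for each start i, extend the substring rightward (temp = temp + string[j]),
-- maintaining its distinct-char set ans; count len(ans) for each unseen substring.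
def countTotalDistinct (string : String) : Int :=
  let s := string.toList
  let n : Int := (s.length : Int)
  let res := (PySem.List.pyRange 0 n).foldl
    (fun (st : PySem.Set (List Char) × Int) i =>
      let inner := (PySem.List.pyRange i n).foldl
        (fun (q : List Char × PySem.Set Char × PySem.Set (List Char) × Int) j =>
          let c := PySem.List.pyGetD s j ' '
          let temp := q.1 ++ [c]
          let ans := PySem.Set.add q.2.1 c
          if PySem.Set.contains q.2.2.1 temp = false then
            (temp, ans, PySem.Set.add q.2.2.1 temp, q.2.2.2 + PySem.Set.len ans)
          else
            (temp, ans, q.2.2.1, q.2.2.2))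
        (([] : List Char), (PySem.Set.empty : PySem.Set Char), st.1, st.2)
      (inner.2.2.1, inner.2.2.2))
    ((PySem.Set.empty : PySem.Set (List Char)), (0 : Int))
  res.2

-- ===== PORT B =====
-- B: for each end position j, walk i leftward (range(j-1,-1,-1)), maintaining the
-- distinct-char set of string[i:j]; substrings are obtained by slicing.
def countTotalDistinct_alt (string : String) : Int :=
  let s := string.toList
  let n : Int := (s.length : Int)
  let res := (PySem.List.pyRange 1 (n + 1)).foldl
    (fun (st : Int × PySem.Set (List Char)) j =>
      let inner := (PySem.List.pyRange (j - 1) (-1) (-1)).foldl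
        (fun (q : Int × PySem.Set (List Char) × PySem.Set Char) i =>
          let chars := PySem.Set.add q.2.2 (PySem.List.pyGetD s i ' ')
          let sub := PySem.List.slice s (some i) (some j)
          if PySem.Set.contains q.2.1 sub = false then
            (q.1 + PySem.Set.len chars, PySem.Set.add q.2.1 sub, chars)
          else
            (q.1, q.2.1, chars))
        (st.1, st.2, (PySem.Set.empty : PySem.Set Char))
      (inner.1, inner.2.1))
    ((0 : Int), (PySem.Set.empty : PySem.Set (List Char)))
  res.1

-- ===== PRECONDITION & SPEC =====
def Spec_countTotalDistinct (string : String) (out : Int) : Prop := out = countTotalDistinct_alt string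
instance (string : String) (out : Int) : Decidable (Spec_countTotalDistinct string out) := by unfold Spec_countTotalDistinct; infer_instance

-- ===== CLAIM (what is proved, stated in full; the proofs are below) =====
def Claim_equal_countTotalDistinct : Prop := ∀ (string : String), Dom_countTotalDistinct string → Spec_countTotalDistinct string (countTotalDistinct string)

-- ===== LEMMAS AND PROOFS =====

-- substring s[i:j]
def pvSub (s : List Char) (i j : Nat) : List Char := (s.drop i).take (j - i)

-- the value counted for a newly seen substring t: its number of distinct characters
def pvF (t : List Char) : Int := PySem.Set.len (PySem.Set.ofList t)

-- the pure "count it if unseen" step both inner loops reduce to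
def pvStep (st : PySem.Set (List Char) × Int) (t : List Char) : PySem.Set (List Char) × Int :=
  if PySem.Set.contains st.1 t = false then (PySem.Set.add st.1 t, st.2 + pvF t) else st

-- A's inner-loop body and per-start-index body (definitionally equal to the port's lambdas)
def pvInA (s : List Char) (q : List Char × PySem.Set Char × PySem.Set (List Char) × Int)
    (j : Int) : List Char × PySem.Set Char × PySem.Set (List Char) × Int :=
  let c := PySem.List.pyGetD s j ' '
  let temp := q.1 ++ [c]
  let ans := PySem.Set.add q.2.1 c
  if PySem.Set.contains q.2.2.1 temp = false then
    (temp, ans, PySem.Set.add q.2.2.1 temp, q.2.2.2 + PySem.Set.len ans)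
  else
    (temp, ans, q.2.2.1, q.2.2.2)

def pvBodyA (s : List Char) (st : PySem.Set (List Char) × Int) (i : Int) :
    PySem.Set (List Char) × Int :=
  let inner := (PySem.List.pyRange i (s.length : Int)).foldl (pvInA s)
    (([] : List Char), (PySem.Set.empty : PySem.Set Char), st.1, st.2)
  (inner.2.2.1, inner.2.2.2)

-- B's inner-loop body and per-end-index body
def pvInB (s : List Char) (j : Int) (q : Int × PySem.Set (List Char) × PySem.Set Char)
    (i : Int) : Int × PySem.Set (List Char) × PySem.Set Char :=
  let chars := PySem.Set.add q.2.2 (PySem.List.pyGetD s i ' ')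
  let sub := PySem.List.slice s (some i) (some j)
  if PySem.Set.contains q.2.1 sub = false then
    (q.1 + PySem.Set.len chars, PySem.Set.add q.2.1 sub, chars)
  else
    (q.1, q.2.1, chars)

def pvBodyB (s : List Char) (st : Int × PySem.Set (List Char)) (j : Int) :
    Int × PySem.Set (List Char) :=
  let inner := (PySem.List.pyRange (j - 1) (-1) (-1)).foldl (pvInB s j)
    (st.1, st.2, (PySem.Set.empty : PySem.Set Char))
  (inner.1, inner.2.1)

-- pure per-index folds and the two substring enumerations
def pvGA (s : List Char) (st : PySem.Set (List Char) × Int) (k : Nat) :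
    PySem.Set (List Char) × Int :=
  ((List.range' k (s.length - k)).map (fun j => pvSub s k (j + 1))).foldl pvStep st

def pvGB (s : List Char) (st : PySem.Set (List Char) × Int) (k : Nat) :
    PySem.Set (List Char) × Int :=
  ((List.range' 0 (k + 1)).map (fun kk => pvSub s (k + 1 - 1 - kk) (k + 1))).foldl pvStep st

def pvLA (s : List Char) : List (List Char) :=
  (List.range s.length).flatMap
    (fun k => (List.range' k (s.length - k)).map (fun j => pvSub s k (j + 1)))
def pvLB (s : List Char) : List (List Char) :=
  (List.range s.length).flatMap
    (fun k => (List.range' 0 (k + 1)).map (fun kk => pvSub s (k + 1 - 1 - kk) (k + 1)))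

lemma pvSet_ofList_append {α : Type} [BEq α] (l : List α) (c : α) :
    PySem.Set.ofList (l ++ [c]) = PySem.Set.add (PySem.Set.ofList l) c := by
  simp [PySem.Set.ofList_eq_foldl, List.foldl_append]

lemma pvUpdate_extend {α : Type} [BEq α] (L : List α) (seen : PySem.Set α) :
    ∃ r, PySem.Set.update seen L = seen ++ r := by
  induction L generalizing seen with
  | nil => exact ⟨[], by simp [PySem.Set.update]⟩
  | cons t L ih =>
    have h : PySem.Set.update seen (t :: L) = PySem.Set.update (PySem.Set.add seen t) L := rfl
    rcases ih (PySem.Set.add seen t) with ⟨r, hr⟩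
    by_cases hc : PySem.Set.contains seen t = true
    · have hadd : PySem.Set.add seen t = seen := by unfold PySem.Set.add; rw [if_pos hc]
      exact ⟨r, by rw [h, hr, hadd]⟩
    · have hadd : PySem.Set.add seen t = seen ++ [t] := by unfold PySem.Set.add; rw [if_neg hc]
      exact ⟨t :: r, by rw [h, hr, hadd]; simp⟩

lemma pvFoldl_step (L : List (List Char)) :
    ∀ (seen : PySem.Set (List Char)) (c : Int),
      L.foldl pvStep (seen, c)
        = (PySem.Set.update seen L,
           c + (((PySem.Set.update seen L).drop seen.length).map pvF).sum) := by
  induction L with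
  | nil =>
    intro seen c
    simp [PySem.Set.update, List.drop_length]
  | cons t L ih =>
    intro seen c
    rw [List.foldl_cons]
    have hupd0 : PySem.Set.update seen (t :: L) = PySem.Set.update (PySem.Set.add seen t) L := rfl
    by_cases hc : PySem.Set.contains seen t = false
    · have hadd : PySem.Set.add seen t = seen ++ [t] := by
        unfold PySem.Set.add; rw [if_neg (by rw [hc]; simp)]
      have hstep : pvStep (seen, c) t = (seen ++ [t], c + pvF t) := by
        unfold pvStep; rw [if_pos hc, hadd]
      rw [hstep, ih, hupd0, hadd]
      rcases pvUpdate_extend L (seen ++ [t]) with ⟨r, hr⟩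
      rw [hr]
      have h4 : (seen ++ [t]).length = seen.length + 1 := by simp
      have e1 : seen ++ [t] ++ r = seen ++ (t :: r) := by simp
      rw [h4, e1]
      have h2 : (seen ++ (t :: r)).drop seen.length = t :: r := List.drop_left
      have h3 : (seen ++ (t :: r)).drop (seen.length + 1) = r := by
        have := @List.drop_left (List Char) (seen ++ [t]) r
        rw [h4, e1] at this
        exact this
      rw [h2, h3]
      refine Prod.ext_iff.mpr ⟨rfl, ?_⟩
      rw [List.map_cons, List.sum_cons]
      ring
    · have hc' : PySem.Set.contains seen t = true := by
        cases h2 : PySem.Set.contains seen t with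
        | false => exact absurd h2 hc
        | true => rfl
      have hadd : PySem.Set.add seen t = seen := by unfold PySem.Set.add; rw [if_pos hc']
      have hstep : pvStep (seen, c) t = (seen, c) := by unfold pvStep; rw [if_neg hc]
      rw [hstep, hupd0, hadd]
      exact ih seen c

lemma pvLen_ofList_reverse (l : List Char) :
    PySem.Set.len (PySem.Set.ofList l.reverse) = PySem.Set.len (PySem.Set.ofList l) := by
  have hperm : (PySem.Set.ofList l.reverse).Perm (PySem.Set.ofList l) := by
    rw [List.perm_ext_iff_of_nodup (PySem.Set.nodup_ofList _) (PySem.Set.nodup_ofList _)]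
    intro a
    simp [PySem.Set.mem_ofList]
  simp [PySem.Set.len, hperm.length_eq]

lemma pvSub_self (s : List Char) (i : Nat) : pvSub s i i = [] := by
  simp [pvSub]

lemma pvSub_snoc (s : List Char) (i j : Nat) (hij : i ≤ j) (hj : j < s.length) :
    pvSub s i j ++ [s.getD j ' '] = pvSub s i (j + 1) := by
  unfold pvSub
  have h1 : j + 1 - i = (j - i) + 1 := by omega
  have h2 : j - i < (s.drop i).length := by
    simp [List.length_drop]; omega
  rw [h1, List.take_succ]
  have h3 : (s.drop i)[j - i]? = some (s.getD j ' ') := by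
    rw [List.getElem?_eq_getElem h2]
    congr 1
    rw [List.getElem_drop]
    rw [List.getD_eq_getElem s ' ' hj]
    congr 1
    omega
  rw [h3]
  rfl

lemma pvSub_cons (s : List Char) (i j : Nat) (hij : i < j) (hj : j ≤ s.length) :
    pvSub s i j = s.getD i ' ' :: pvSub s (i + 1) j := by
  unfold pvSub
  have hi : i < s.length := by omega
  have hd : s.drop i = s[i] :: s.drop (i + 1) := List.drop_eq_getElem_cons hi
  rw [hd]
  have h1 : j - i = (j - (i + 1)) + 1 := by omega
  rw [h1, List.take_succ_cons]
  rw [List.getD_eq_getElem s ' ' hi]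

lemma pvRange_nil (a b : Int) (h : b ≤ a) : PySem.List.pyRange a b = [] := by
  rw [PySem.List.pyRange_of_pos a b Int.one_pos]
  rw [if_neg (by omega)]
  simp

lemma pvRange_outer_B (n : Nat) :
    PySem.List.pyRange 1 ((n : Int) + 1) = (List.range n).map (fun (k : Nat) => ((k : Int) + 1)) := by
  rw [PySem.List.pyRange_of_pos 1 ((n : Int) + 1) Int.one_pos]
  rcases Nat.eq_zero_or_pos n with h0 | hpos
  · subst h0; rw [if_neg (by omega)]; simp
  · rw [if_pos (by omega)]
    have h1 : (((n : Int) + 1 - 1 + 1 - 1) / 1).toNat = n := by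
      have : ((n : Int) + 1 - 1 + 1 - 1) / 1 = (n : Int) := by
        rw [Int.ediv_one]; ring
      rw [this, Int.toNat_natCast]
    rw [h1]
    apply List.map_congr_left
    intro k _
    ring

lemma pvRange_inner_B (j : Nat) (hj : 1 ≤ j) :
    PySem.List.pyRange ((j : Int) - 1) (-1) (-1)
      = (List.range j).map (fun k => (((j - 1 - k : Nat)) : Int)) := by
  rw [PySem.List.pyRange_of_neg ((j : Int) - 1) (-1) (by omega)]
  rw [if_pos (by omega)]
  have h1 : (((j : Int) - 1 - (-1) + - -1 - 1) / - -1).toNat = j := by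
    have : ((j : Int) - 1 - (-1) + - -1 - 1) / - -1 = (j : Int) := by
      norm_num
    rw [this, Int.toNat_natCast]
  rw [h1]
  apply List.map_congr_left
  intro k hk
  have hk' : k < j := List.mem_range.mp hk
  have : ((j - 1 - k : Nat) : Int) = (j : Int) - 1 - (k : Int) := by omega
  rw [this]
  ring

-- ===== inner loop of A =====
lemma pvInnerA (s : List Char) (i : Nat) :
    ∀ (m j0 : Nat), j0 + m = s.length → i ≤ j0 →
    ∀ (items : PySem.Set (List Char)) (cnt : Int),
      (PySem.List.pyRange (j0 : Int) (s.length : Int)).foldl (pvInA s)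
        (pvSub s i j0, PySem.Set.ofList (pvSub s i j0), items, cnt)
      = (pvSub s i s.length, PySem.Set.ofList (pvSub s i s.length),
         ((List.range' j0 m).map (fun j => pvSub s i (j + 1))).foldl pvStep (items, cnt)) := by
  intro m
  induction m with
  | zero =>
    intro j0 h hij items cnt
    have hj0 : j0 = s.length := by omega
    subst hj0
    rw [pvRange_nil _ _ (le_refl _)]
    simp
  | succ m ih =>
    intro j0 h hij items cnt
    have hj0 : j0 < s.length := by omega
    have hlt : (j0 : Int) < (s.length : Int) := by exact_mod_cast hj0
    rw [PySem.List.pyRange_one_cons hlt, List.foldl_cons]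
    have hget : PySem.List.pyGetD s ((j0 : Nat) : Int) ' ' = s.getD j0 ' ' := by
      rw [PySem.List.pyGetD_natCast]
    have htemp : pvSub s i j0 ++ [s.getD j0 ' '] = pvSub s i (j0 + 1) :=
      pvSub_snoc s i j0 hij hj0
    have hans : PySem.Set.add (PySem.Set.ofList (pvSub s i j0)) (s.getD j0 ' ')
        = PySem.Set.ofList (pvSub s i (j0 + 1)) := by
      rw [← pvSet_ofList_append, htemp]
    have hbody : pvInA s (pvSub s i j0, PySem.Set.ofList (pvSub s i j0), items, cnt)
          ((j0 : Nat) : Int)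
        = (pvSub s i (j0 + 1), PySem.Set.ofList (pvSub s i (j0 + 1)),
           pvStep (items, cnt) (pvSub s i (j0 + 1))) := by
      unfold pvInA
      simp only [hget]
      rw [htemp, hans]
      by_cases hc : PySem.Set.contains items (pvSub s i (j0 + 1)) = false
      · rw [if_pos hc]; unfold pvStep; rw [if_pos hc]; try rfl
      · rw [if_neg hc]; unfold pvStep; rw [if_neg hc]; try rfl
    rw [hbody]
    have hcast : ((j0 : Nat) : Int) + 1 = (((j0 + 1 : Nat)) : Int) := by push_cast; ring
    rw [hcast]
    rw [List.range'_succ, List.map_cons, List.foldl_cons]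
    exact ih (j0 + 1) (by omega) (by omega)
      (pvStep (items, cnt) (pvSub s i (j0 + 1))).1 (pvStep (items, cnt) (pvSub s i (j0 + 1))).2

-- ===== inner loop of B =====
lemma pvInnerB (s : List Char) (j : Nat) (hj1 : 1 ≤ j) (hjn : j ≤ s.length) :
    ∀ (m k0 : Nat), k0 + m = j →
    ∀ (cnt : Int) (seen : PySem.Set (List Char)),
      (List.range' k0 m).foldl
        (fun q k => pvInB s ((j : Nat) : Int) q (((j - 1 - k : Nat)) : Int))
        (cnt, seen, PySem.Set.ofList ((pvSub s (j - k0) j).reverse))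
      = ((((List.range' k0 m).map (fun k => pvSub s (j - 1 - k) j)).foldl pvStep (seen, cnt)).2,
         (((List.range' k0 m).map (fun k => pvSub s (j - 1 - k) j)).foldl pvStep (seen, cnt)).1,
         PySem.Set.ofList ((pvSub s 0 j).reverse)) := by
  intro m
  induction m with
  | zero =>
    intro k0 h cnt seen
    have hzz : j - k0 = 0 := by omega
    rw [hzz]
    rfl
  | succ m ih =>
    intro k0 h cnt seen
    have hk0 : k0 < j := by omega
    set i := j - 1 - k0 with hi
    have hij : i < j := by omega
    have hi1 : i + 1 = j - k0 := by omega
    have hget : PySem.List.pyGetD s ((i : Nat) : Int) ' ' = s.getD i ' ' := by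
      rw [PySem.List.pyGetD_natCast]
    have hsubcons : pvSub s i j = s.getD i ' ' :: pvSub s (i + 1) j :=
      pvSub_cons s i j hij hjn
    have hchars : PySem.Set.add (PySem.Set.ofList ((pvSub s (j - k0) j).reverse)) (s.getD i ' ')
        = PySem.Set.ofList ((pvSub s i j).reverse) := by
      rw [hsubcons, List.reverse_cons, pvSet_ofList_append, hi1]
    have hslice : PySem.List.slice s (some ((i : Nat) : Int)) (some ((j : Nat) : Int))
        = pvSub s i j := by
      rw [PySem.List.slice_natCast]
      rfl
    have hlen : PySem.Set.len (PySem.Set.ofList ((pvSub s i j).reverse)) = pvF (pvSub s i j) := by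
      rw [pvLen_ofList_reverse]; rfl
    rw [List.range'_succ, List.foldl_cons]
    have hbody : pvInB s ((j : Nat) : Int)
          (cnt, seen, PySem.Set.ofList ((pvSub s (j - k0) j).reverse)) (((j - 1 - k0 : Nat)) : Int)
        = ((pvStep (seen, cnt) (pvSub s i j)).2, (pvStep (seen, cnt) (pvSub s i j)).1,
           PySem.Set.ofList ((pvSub s i j).reverse)) := by
      unfold pvInB
      rw [← hi]
      simp only [hget]
      rw [hchars, hslice, hlen]
      by_cases hc : PySem.Set.contains seen (pvSub s i j) = false
      · rw [if_pos hc]; unfold pvStep; rw [if_pos hc]; try rfl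
      · rw [if_neg hc]; unfold pvStep; rw [if_neg hc]; try rfl
    rw [hbody]
    rw [List.map_cons, List.foldl_cons]
    have h2 := ih (k0 + 1) (by omega)
      (pvStep (seen, cnt) (pvSub s i j)).2 (pvStep (seen, cnt) (pvSub s i j)).1
    rw [show j - (k0 + 1) = i from by omega] at h2
    exact h2

-- swap bookkeeping for B's outer fold (state order (cnt, seen) vs pvStep's (seen, cnt))
lemma pvFoldl_swap {α : Type} (l : List α)
    (f : (PySem.Set (List Char) × Int) → α → (PySem.Set (List Char) × Int)) :
    ∀ (init : Int × PySem.Set (List Char)),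
      l.foldl (fun st x => Prod.swap (f (Prod.swap st) x)) init
        = Prod.swap (l.foldl f (Prod.swap init)) := by
  induction l with
  | nil => intro init; simp
  | cons x l ih =>
    intro init
    rw [List.foldl_cons, List.foldl_cons, ih]
    simp

-- A's result is the pvF-sum over its deduplicated substring enumeration
lemma pvA_eq (string : String) :
    countTotalDistinct string = ((PySem.Set.ofList (pvLA string.toList)).map pvF).sum := by
  have hpt : ∀ (st : PySem.Set (List Char) × Int), ∀ k ∈ List.range string.toList.length,
      pvBodyA string.toList st ((k : Nat) : Int) = pvGA string.toList st k := by
    intro st k hk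
    have hk' : k < string.toList.length := List.mem_range.mp hk
    unfold pvBodyA
    have h := pvInnerA string.toList k (string.toList.length - k) k (by omega) (le_refl k)
      st.1 st.2
    rw [pvSub_self] at h
    exact congrArg (fun p => (p.2.2.1, p.2.2.2)) h
  calc countTotalDistinct string
      = (List.foldl (pvBodyA string.toList)
          ((PySem.Set.empty : PySem.Set (List Char)), (0 : Int))
          ((List.range string.toList.length).map (fun k => ((k : Nat) : Int)))).2 :=
        congrArg (fun l => (List.foldl (pvBodyA string.toList)
          ((PySem.Set.empty : PySem.Set (List Char)), (0 : Int)) l).2)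
          (PySem.List.pyRange_zero_natCast string.toList.length)
    _ = (List.foldl (fun st (k : Nat) => pvBodyA string.toList st ((k : Nat) : Int))
          ((PySem.Set.empty : PySem.Set (List Char)), (0 : Int))
          (List.range string.toList.length)).2 :=
        congrArg (fun p : PySem.Set (List Char) × Int => p.2) List.foldl_map
    _ = (List.foldl (pvGA string.toList)
          ((PySem.Set.empty : PySem.Set (List Char)), (0 : Int))
          (List.range string.toList.length)).2 :=
        congrArg (fun p : PySem.Set (List Char) × Int => p.2)
          (PySem.List.foldl_congr_mem _ _ _ _ hpt)
    _ = (List.foldl pvStep ((PySem.Set.empty : PySem.Set (List Char)), (0 : Int))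
          (pvLA string.toList)).2 :=
        congrArg (fun p : PySem.Set (List Char) × Int => p.2) List.foldl_flatMap.symm
    _ = ((PySem.Set.ofList (pvLA string.toList)).map pvF).sum := by
        rw [pvFoldl_step (pvLA string.toList) PySem.Set.empty 0]
        simp [PySem.Set.update, PySem.Set.empty, PySem.Set.ofList_eq_foldl]

-- B's result is the pvF-sum over its deduplicated substring enumeration
lemma pvB_eq (string : String) :
    countTotalDistinct_alt string = ((PySem.Set.ofList (pvLB string.toList)).map pvF).sum := by
  have hpt : ∀ (st : Int × PySem.Set (List Char)), ∀ k ∈ List.range string.toList.length,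
      pvBodyB string.toList st (((k : Nat) : Int) + 1)
        = Prod.swap (pvGB string.toList (Prod.swap st) k) := by
    intro st k hk
    have hk' : k < string.toList.length := List.mem_range.mp hk
    have hcast : ((k : Nat) : Int) + 1 = (((k + 1 : Nat)) : Int) := by push_cast; ring
    rw [hcast]
    unfold pvBodyB
    rw [pvRange_inner_B (k + 1) (by omega), List.foldl_map, List.range_eq_range']
    have h := pvInnerB string.toList (k + 1) (by omega) (by omega) (k + 1) 0 (by omega)
      st.1 st.2
    rw [Nat.sub_zero, pvSub_self] at h
    exact congrArg (fun p => (p.1, p.2.1)) h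
  calc countTotalDistinct_alt string
      = (List.foldl (pvBodyB string.toList)
          ((0 : Int), (PySem.Set.empty : PySem.Set (List Char)))
          ((List.range string.toList.length).map (fun k => ((k : Nat) : Int) + 1))).1 :=
        congrArg (fun l => (List.foldl (pvBodyB string.toList)
          ((0 : Int), (PySem.Set.empty : PySem.Set (List Char))) l).1)
          (pvRange_outer_B string.toList.length)
    _ = (List.foldl (fun st (k : Nat) => pvBodyB string.toList st (((k : Nat) : Int) + 1))
          ((0 : Int), (PySem.Set.empty : PySem.Set (List Char)))
          (List.range string.toList.length)).1 :=
        congrArg (fun p : Int × PySem.Set (List Char) => p.1) List.foldl_map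
    _ = (List.foldl (fun st (k : Nat) => Prod.swap (pvGB string.toList (Prod.swap st) k))
          ((0 : Int), (PySem.Set.empty : PySem.Set (List Char)))
          (List.range string.toList.length)).1 :=
        congrArg (fun p : Int × PySem.Set (List Char) => p.1)
          (PySem.List.foldl_congr_mem _ _ _ _ hpt)
    _ = (List.foldl (pvGB string.toList)
          ((PySem.Set.empty : PySem.Set (List Char)), (0 : Int))
          (List.range string.toList.length)).2 :=
        by
          have hsw := pvFoldl_swap (List.range string.toList.length) (pvGB string.toList)
            ((0 : Int), (PySem.Set.empty : PySem.Set (List Char)))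
          exact congrArg (fun p : Int × PySem.Set (List Char) => p.1) hsw
    _ = (List.foldl pvStep ((PySem.Set.empty : PySem.Set (List Char)), (0 : Int))
          (pvLB string.toList)).2 :=
        congrArg (fun p : PySem.Set (List Char) × Int => p.2) List.foldl_flatMap.symm
    _ = ((PySem.Set.ofList (pvLB string.toList)).map pvF).sum := by
        rw [pvFoldl_step (pvLB string.toList) PySem.Set.empty 0]
        simp [PySem.Set.update, PySem.Set.empty, PySem.Set.ofList_eq_foldl]

-- ===== the two enumerations cover the same substrings =====
lemma pvMem_LA_iff (s : List Char) (t : List Char) :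
    t ∈ pvLA s ↔ ∃ a b : Nat, a < b ∧ b ≤ s.length ∧ t = pvSub s a b := by
  simp only [pvLA, List.mem_flatMap, List.mem_map, List.mem_range, List.mem_range'_1]
  constructor
  · rintro ⟨i, hi, j, ⟨hj1, hj2⟩, rfl⟩
    exact ⟨i, j + 1, by omega, by omega, rfl⟩
  · rintro ⟨a, b, hab, hbn, rfl⟩
    refine ⟨a, by omega, b - 1, ⟨by omega, by omega⟩, ?_⟩
    congr 1
    omega

lemma pvMem_LB_iff (s : List Char) (t : List Char) :
    t ∈ pvLB s ↔ ∃ a b : Nat, a < b ∧ b ≤ s.length ∧ t = pvSub s a b := by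
  simp only [pvLB, List.mem_flatMap, List.mem_map, List.mem_range, List.mem_range'_1]
  constructor
  · rintro ⟨kj, hkj, kk, ⟨_, hkk⟩, rfl⟩
    exact ⟨kj + 1 - 1 - kk, kj + 1, by omega, by omega, rfl⟩
  · rintro ⟨a, b, hab, hbn, rfl⟩
    refine ⟨b - 1, by omega, b - 1 - a, ⟨by omega, by omega⟩, ?_⟩
    congr 1
    · omega
    · omega

lemma pvPerm (s : List Char) :
    (PySem.Set.ofList (pvLA s)).Perm (PySem.Set.ofList (pvLB s)) := by
  rw [List.perm_ext_iff_of_nodup (PySem.Set.nodup_ofList _) (PySem.Set.nodup_ofList _)]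
  intro t
  rw [PySem.Set.mem_ofList, PySem.Set.mem_ofList, pvMem_LA_iff, pvMem_LB_iff]

-- ===== VERDICT (by name: the statement is the Claim_ definition above) =====
theorem countTotalDistinct_spec : Claim_equal_countTotalDistinct := by
  intro string _
  unfold Spec_countTotalDistinct
  rw [pvA_eq, pvB_eq]
  exact (((pvPerm string.toList).map pvF).sum_eq)
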